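-- pv_equiv track=rewrite | github.com/ageev-aleksey/sppu | sub_project/ml/utils.py | findEndControll
-- ===== SOURCE A (Python) =====
-- def findEndControll(v):
--     """Поиск поледней точки в данных, выполняющее управление"""
--     index = 0;
--     for el in v['duty_cycle'][::-1]:
--         if el != 0:
--             break
--         else:
--             index = index + 1
--     return len(v['duty_cycle']) - index
-- ===== SOURCE B (Python) =====
-- def findEndControll(v):
--     last = 0
--     for i, el in enumerate(v['duty_cycle']):
--         if el != 0:
--             last = i + 1
--     return last
-- ===== Notes on version B (the rewrite author's own statement) =====
-- stated objective: simpler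
-- what changed: Single forward pass keeping a running 'position after last nonzero' accumulator, instead of reversing the list and counting trailing zeros with an early break then reconstructing via len-index.
import Mathlib
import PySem

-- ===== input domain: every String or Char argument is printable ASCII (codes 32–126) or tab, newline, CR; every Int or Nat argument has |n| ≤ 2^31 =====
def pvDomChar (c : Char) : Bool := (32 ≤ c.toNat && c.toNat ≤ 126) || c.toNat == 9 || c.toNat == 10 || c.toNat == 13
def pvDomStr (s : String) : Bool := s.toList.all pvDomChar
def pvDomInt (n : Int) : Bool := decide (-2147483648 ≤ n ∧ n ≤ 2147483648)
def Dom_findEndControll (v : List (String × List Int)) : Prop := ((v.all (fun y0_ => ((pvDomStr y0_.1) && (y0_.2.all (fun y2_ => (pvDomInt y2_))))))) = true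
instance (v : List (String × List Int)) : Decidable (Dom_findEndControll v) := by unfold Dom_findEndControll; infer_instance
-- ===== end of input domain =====

-- B replaces the reverse-scan-with-break and len-index arithmetic by a single forward
-- pass that keeps a running "position after last nonzero" accumulator (objective: simpler).

-- ===== PORT A =====
-- the for-loop over dc[::-1] with break: counts leading zeros of the reversed list
def pvRevZeroCount : List Int → Int
  | [] => 0
  | el :: rest => if el ≠ 0 then 0 else pvRevZeroCount rest + 1

def findEndControll (v : List (String × List Int)) : Int :=
  match (PySem.Dict.mk v).get? "duty_cycle" with
  | none => 0   -- unreachable under Pre_ (Python raises KeyError here)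
  | some dc =>
    -- dc[::-1]
    let rev := (PySem.List.slice? dc none none (-1)).getD []
    (dc.length : Int) - pvRevZeroCount rev

-- ===== PORT B =====
def findEndControll_alt (v : List (String × List Int)) : Int :=
  match (PySem.Dict.mk v).get? "duty_cycle" with
  | none => 0   -- unreachable under Pre_ (Python raises KeyError here)
  | some dc =>
    (PySem.List.enumerate dc 0).foldl (fun last p => if p.2 ≠ 0 then p.1 + 1 else last) 0

-- ===== PRECONDITION & SPEC =====
-- Pre_ excludes exactly the inputs without a 'duty_cycle' key, on which Python A raises KeyError.
def Pre_findEndControll (v : List (String × List Int)) : Prop :=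
  ((PySem.Dict.mk v).get? "duty_cycle").isSome = true
instance (v : List (String × List Int)) : Decidable (Pre_findEndControll v) := by
  unfold Pre_findEndControll; infer_instance

def pvWitness_findEndControll : (List (String × List Int)) := [("duty_cycle", [1, 0, 2, 0])]

def Spec_findEndControll (v : List (String × List Int)) (out : Int) : Prop := out = findEndControll_alt v
instance (v : List (String × List Int)) (out : Int) : Decidable (Spec_findEndControll v out) := by unfold Spec_findEndControll; infer_instance

-- ===== CLAIM (what is proved, stated in full; the proofs are below) =====
def Claim_equal_findEndControll : Prop := ∀ (v : List (String × List Int)), Dom_findEndControll v → Pre_findEndControll v → Spec_findEndControll v (findEndControll v)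

-- ===== LEMMAS AND PROOFS =====

theorem pvRevZeroCount_concat (ys : List Int) (y : Int) :
    pvRevZeroCount ((ys ++ [y]).reverse) =
      if y ≠ 0 then 0 else pvRevZeroCount ys.reverse + 1 := by
  simp [pvRevZeroCount]

theorem pvFold_concat (ys : List Int) (y : Int) (acc : Int) :
    (PySem.List.enumerate (ys ++ [y]) 0).foldl
        (fun last p => if p.2 ≠ 0 then p.1 + 1 else last) acc =
      if y ≠ 0 then (ys.length : Int) + 1
      else (PySem.List.enumerate ys 0).foldl
        (fun last p => if p.2 ≠ 0 then p.1 + 1 else last) acc := by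
  rw [PySem.List.enumerate_append]
  simp only [List.foldl_append, PySem.List.enumerate_cons, PySem.List.enumerate_nil,
    List.foldl_cons, List.foldl_nil]
  split_ifs <;> simp_all

theorem pvCore (dc : List Int) :
    (dc.length : Int) - pvRevZeroCount dc.reverse =
      (PySem.List.enumerate dc 0).foldl
        (fun last p => if p.2 ≠ 0 then p.1 + 1 else last) 0 := by
  induction dc using List.reverseRecOn with
  | nil => simp [pvRevZeroCount, PySem.List.enumerate_nil]
  | append_singleton ys y ih =>
    rw [pvRevZeroCount_concat, pvFold_concat]
    split_ifs with h
    · simp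
    · rw [← ih]; simp

-- ===== VERDICT (by name: the statement is the Claim_ definition above) =====
theorem findEndControll_spec : Claim_equal_findEndControll := by
  intro v _ hpre
  unfold Spec_findEndControll findEndControll findEndControll_alt
  unfold Pre_findEndControll at hpre
  cases hget : (PySem.Dict.mk v).get? "duty_cycle" with
  | none => simp [hget] at hpre
  | some dc =>
    simp only [PySem.List.slice?_none_none_neg_one, Option.getD_some]
    exact pvCore dc
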